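-- pv_equiv track=rewrite | github.com/naturalstupid/PyJHora | src/jhora/horoscope/dhasa/graha/shastihayani.py | _antardhasa
-- ===== SOURCE A (Python) =====
-- dhasa_adhipathi_list = {4:10,0:10,2:10,1:6,3:6,5:6,6:6,7:6} #  Total 60 years
--
-- def _next_adhipati(lord,dirn=1):
--     """Returns next lord after `lord` in the adhipati_list"""
--     current = list(dhasa_adhipathi_list.keys()).index(lord)
--     next_lord = list(dhasa_adhipathi_list.keys())[((current + dirn) % len(dhasa_adhipathi_list))]
--     return next_lord
--
-- def _antardhasa(dhasa_lord,antardhasa_option=1):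
--     lord = dhasa_lord
--     if antardhasa_option in [3,4]:
--         lord = _next_adhipati(dhasa_lord, dirn=1)
--     elif antardhasa_option in [5,6]:
--         lord = _next_adhipati(dhasa_lord, dirn=-1)
--     dirn = 1 if antardhasa_option in [1,3,5] else -1
--     _bhukthis = []
--     for _ in range(len(dhasa_adhipathi_list)):
--         _bhukthis.append(lord)
--         lord = _next_adhipati(lord,dirn)
--     return _bhukthis
-- ===== SOURCE B (Python) =====
-- def _antardhasa(dhasa_lord, antardhasa_option=1):
--     keys = [4, 0, 2, 1, 3, 5, 6, 7]  # list(dhasa_adhipathi_list)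
--     i = keys.index(dhasa_lord)
--     if antardhasa_option in [3, 4]:
--         i = (i + 1) % 8
--     elif antardhasa_option in [5, 6]:
--         i = (i - 1) % 8
--     if antardhasa_option in [1, 3, 5]:
--         return keys[i:] + keys[:i]
--     return [keys[(i - j) % 8] for j in range(8)]
-- ===== Notes on version B (the rewrite author's own statement) =====
-- stated objective: simpler
-- what changed: Replaces the per-step _next_adhipati walk (a fresh keys.index scan per element) with one index lookup and a single rotation/slice construction of the 8-element cycle.
import Mathlib
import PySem

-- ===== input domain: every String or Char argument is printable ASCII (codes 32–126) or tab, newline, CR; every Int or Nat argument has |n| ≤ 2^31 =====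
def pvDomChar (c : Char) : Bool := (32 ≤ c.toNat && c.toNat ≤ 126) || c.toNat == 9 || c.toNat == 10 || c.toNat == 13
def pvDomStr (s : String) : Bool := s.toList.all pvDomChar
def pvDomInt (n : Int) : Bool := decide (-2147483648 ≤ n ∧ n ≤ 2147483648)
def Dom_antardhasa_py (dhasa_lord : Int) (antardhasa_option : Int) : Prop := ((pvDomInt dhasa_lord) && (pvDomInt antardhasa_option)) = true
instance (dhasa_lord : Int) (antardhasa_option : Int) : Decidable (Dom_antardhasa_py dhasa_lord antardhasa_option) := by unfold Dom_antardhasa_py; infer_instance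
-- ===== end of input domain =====

-- B replaces A's per-step helper walk (a fresh list-index scan per element) with one index
-- lookup and a single slice/rotation construction of the 8-element lord cycle (objective: simpler).


-- ===== PORT A =====
-- list(dhasa_adhipathi_list.keys()) of {4:10,0:10,2:10,1:6,3:6,5:6,6:6,7:6}
def dhasaAdhipathiKeys : List Int := [4, 0, 2, 1, 3, 5, 6, 7]

-- _next_adhipati: keys.index(lord) (none = ValueError), then keys[(current + dirn) % 8]
def nextAdhipatiA (lord : Int) (dirn : Int) : Option Int :=
  (PySem.List.index? dhasaAdhipathiKeys lord).bind fun current =>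
    PySem.List.pyGet? dhasaAdhipathiKeys (PySem.Int.mod ((current : Int) + dirn) 8)

def antardhasa_py (dhasa_lord : Int) (antardhasa_option : Int) : List Int :=
  let lord0 : Option Int :=
    if antardhasa_option = 3 ∨ antardhasa_option = 4 then nextAdhipatiA dhasa_lord 1
    else if antardhasa_option = 5 ∨ antardhasa_option = 6 then nextAdhipatiA dhasa_lord (-1)
    else some dhasa_lord
  let dirn : Int :=
    if antardhasa_option = 1 ∨ antardhasa_option = 3 ∨ antardhasa_option = 5 then 1 else -1
  -- for _ in range(8): _bhukthis.append(lord); lord = _next_adhipati(lord, dirn)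
  (((List.range dhasaAdhipathiKeys.length).foldl
      (fun (st : Option Int × List Int) _ =>
        match st with
        | (none, acc) => (none, acc)
        | (some l, acc) => (nextAdhipatiA l dirn, acc ++ [l]))
      (lord0, []))).2

-- ===== PORT B =====
def antardhasa_py_alt (dhasa_lord : Int) (antardhasa_option : Int) : List Int :=
  let keys : List Int := [4, 0, 2, 1, 3, 5, 6, 7]
  match PySem.List.index? keys dhasa_lord with
  | none => []   -- Python raises ValueError here; excluded by Pre_
  | some i0 =>
    let i : Int :=
      if antardhasa_option = 3 ∨ antardhasa_option = 4 then PySem.Int.mod ((i0 : Int) + 1) 8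
      else if antardhasa_option = 5 ∨ antardhasa_option = 6 then PySem.Int.mod ((i0 : Int) - 1) 8
      else (i0 : Int)
    if antardhasa_option = 1 ∨ antardhasa_option = 3 ∨ antardhasa_option = 5 then
      PySem.List.slice keys (some i) none ++ PySem.List.slice keys none (some i)
    else
      (PySem.List.pyRange 0 8 1).map fun j => PySem.List.pyGetD keys (PySem.Int.mod (i - j) 8) 0

-- ===== PRECONDITION & SPEC =====
-- Pre_ excludes lords absent from the fixed key dict, on which both A and B raise ValueError.
def Pre_antardhasa_py (dhasa_lord : Int) (antardhasa_option : Int) : Prop :=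
  dhasa_lord = 4 ∨ dhasa_lord = 0 ∨ dhasa_lord = 2 ∨ dhasa_lord = 1 ∨
  dhasa_lord = 3 ∨ dhasa_lord = 5 ∨ dhasa_lord = 6 ∨ dhasa_lord = 7
instance (dhasa_lord : Int) (antardhasa_option : Int) : Decidable (Pre_antardhasa_py dhasa_lord antardhasa_option) := by unfold Pre_antardhasa_py; infer_instance

def pvWitness_antardhasa_py : Int × Int := (4, 1)

def Spec_antardhasa_py (dhasa_lord : Int) (antardhasa_option : Int) (out : List Int) : Prop := out = antardhasa_py_alt dhasa_lord antardhasa_option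
instance (dhasa_lord : Int) (antardhasa_option : Int) (out : List Int) : Decidable (Spec_antardhasa_py dhasa_lord antardhasa_option out) := by unfold Spec_antardhasa_py; infer_instance

-- ===== CLAIM (what is proved, stated in full; the proofs are below) =====
def Claim_equal_antardhasa_py : Prop := ∀ (dhasa_lord : Int) (antardhasa_option : Int), Dom_antardhasa_py dhasa_lord antardhasa_option → Pre_antardhasa_py dhasa_lord antardhasa_option → Spec_antardhasa_py dhasa_lord antardhasa_option (antardhasa_py dhasa_lord antardhasa_option)

-- ===== LEMMAS AND PROOFS =====

-- ===== VERDICT (by name: the statement is the Claim_ definition above) =====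
theorem antardhasa_py_spec : Claim_equal_antardhasa_py := by
  intro d o _ hpre
  unfold Spec_antardhasa_py
  rcases hpre with h | h | h | h | h | h | h | h <;> subst h <;>
  · by_cases h3 : o = 3
    · subst h3; decide
    by_cases h4 : o = 4
    · subst h4; decide
    by_cases h5 : o = 5
    · subst h5; decide
    by_cases h6 : o = 6
    · subst h6; decide
    by_cases h1 : o = 1
    · subst h1; decide
    · simp only [antardhasa_py, antardhasa_py_alt, h1, h3, h4, h5, h6, or_self,
        if_false]
      decide
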